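-- pv_equiv track=rewrite | github.com/Gamabg/EngineerSoft | Computational thinking with Python - José Roberto/0812.py | matriz_zeros
-- ===== SOURCE A (Python) =====
-- def matriz_zeros(m, n):
--     matriz = []
--
--     for i in range(m):
--         linha = []
--         for j in range(n):
--             if i + j == n - 1:
--                 linha.append(1)
--             else:
--                 linha.append(0)
--
--         matriz.append(linha)
--
--     return matriz
-- ===== SOURCE B (Python) =====
-- def matriz_zeros(m, n):
--     # Anti-diagonal matrix by shifting: the first row has its 1 at the last
--     # column; every following row is the previous row shifted left one cell
--     # (the 1 walks off the left edge for rows past the diagonal).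
--     if m <= 0:
--         return []
--     row = [0] * (n - 1) + [1] if n > 0 else []
--     matriz = []
--     for _ in range(m):
--         matriz.append(row)
--         row = (row + [0])[1:]
--     return matriz
-- ===== Notes on version B (the rewrite author's own statement) =====
-- stated objective: alternative
-- what changed: Instead of deciding each cell with a per-cell test i+j==n-1, B computes the first row once and derives every subsequent row from the previous one by a left shift (row = (row+[0])[1:]), so the anti-diagonal 1 propagates by shifting rather than by indexing.
import Mathlib
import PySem

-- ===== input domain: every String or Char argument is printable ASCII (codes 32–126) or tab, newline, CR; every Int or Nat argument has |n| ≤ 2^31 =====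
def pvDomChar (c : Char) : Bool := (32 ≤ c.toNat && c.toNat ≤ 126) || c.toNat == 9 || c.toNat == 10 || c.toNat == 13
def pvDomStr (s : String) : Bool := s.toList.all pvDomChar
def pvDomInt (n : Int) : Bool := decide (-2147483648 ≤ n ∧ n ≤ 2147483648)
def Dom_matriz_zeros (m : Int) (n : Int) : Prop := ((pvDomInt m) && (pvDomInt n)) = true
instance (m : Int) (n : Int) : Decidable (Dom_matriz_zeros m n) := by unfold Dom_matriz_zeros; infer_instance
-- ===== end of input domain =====

-- B builds the first row once and derives each next row by shifting the previous one left,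
-- instead of A's per-cell test; objective: alternative (same cost, different mechanism).

-- ===== PORT A =====
def matriz_zeros (m : Int) (n : Int) : List (List Int) :=
  (PySem.List.pyRange 0 m 1).foldl (fun matriz i =>
    matriz ++ [(PySem.List.pyRange 0 n 1).foldl (fun linha j =>
      if i + j == n - 1 then linha ++ [(1 : Int)] else linha ++ [(0 : Int)]) []]) []

-- ===== PORT B =====
-- m <= 0: empty matrix; else row = [0]*(n-1) + [1] if n > 0 else []; each iteration: append row, row = (row + [0])[1:]
def matriz_zeros_alt (m : Int) (n : Int) : List (List Int) :=
  if m ≤ 0 then [] else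
  let row0 : List Int := if n > 0 then PySem.List.pyRepeat [0] (n - 1) ++ [1] else []
  let st := (PySem.List.pyRange 0 m 1).foldl
    (fun (st : List (List Int) × List Int) _ =>
      (st.1 ++ [st.2], PySem.List.slice (st.2 ++ [0]) (some 1) none))
    ([], row0)
  st.1

-- ===== PRECONDITION & SPEC =====
def Spec_matriz_zeros (m : Int) (n : Int) (out : List (List Int)) : Prop := out = matriz_zeros_alt m n
instance (m : Int) (n : Int) (out : List (List Int)) : Decidable (Spec_matriz_zeros m n out) := by unfold Spec_matriz_zeros; infer_instance

-- ===== CLAIM (what is proved, stated in full; the proofs are below) =====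
def Claim_equal_matriz_zeros : Prop := ∀ (m : Int) (n : Int), Dom_matriz_zeros m n → Spec_matriz_zeros m n (matriz_zeros m n)

-- ===== LEMMAS AND PROOFS =====

-- the row A produces for row index i, written as a map
def pvRowA (n i : Int) : List Int :=
  (List.range n.toNat).map (fun (k : Nat) => if i + (k : Int) = n - 1 then (1 : Int) else 0)

-- A's inner fold equals pvRowA
theorem pvRowA_eq_inner (n i : Int) :
    (PySem.List.pyRange 0 n 1).foldl (fun linha j =>
      if i + j == n - 1 then linha ++ [(1 : Int)] else linha ++ [(0 : Int)]) [] = pvRowA n i := by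
  have h := PySem.List.foldl_append_singleton_eq_map
    (l := PySem.List.pyRange 0 n 1)
    (f := fun j => if i + j == n - 1 then (1 : Int) else 0) (acc := [])
  simp only [List.nil_append] at h
  have h2 : (PySem.List.pyRange 0 n 1).foldl (fun linha j =>
      if i + j == n - 1 then linha ++ [(1 : Int)] else linha ++ [(0 : Int)]) [] =
      (PySem.List.pyRange 0 n 1).map (fun j => if i + j == n - 1 then (1 : Int) else 0) := by
    rw [← h]; congr 1; funext linha j
    by_cases hb : i + j == n - 1 <;> simp [hb]
  rw [h2, PySem.List.pyRange_one, List.map_map, pvRowA]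
  simp only [Int.sub_zero]
  apply List.map_congr_left
  intro k _
  simp [beq_iff_eq]

-- B's initial row equals pvRowA n 0
theorem pvRow0_eq (n : Int) :
    (if n > 0 then PySem.List.pyRepeat [(0 : Int)] (n - 1) ++ [1] else []) = pvRowA n 0 := by
  by_cases hn : n > 0
  · rw [if_pos hn, PySem.List.pyRepeat_singleton, pvRowA]
    apply List.ext_getElem
    · simp; omega
    · intro k hk hk'
      simp only [List.length_map, List.length_range] at hk'
      by_cases hc : k < (n - 1).toNat
      · rw [List.getElem_append_left (by simpa using hc)]
        simp only [List.getElem_replicate, List.getElem_map, List.getElem_range]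
        rw [if_neg (by omega)]
      · have hke : k = (n - 1).toNat := by omega
        subst hke
        rw [List.getElem_append_right (by simp)]
        simp only [List.length_replicate, List.getElem_map, List.getElem_range]
        rw [if_pos (by omega)]
        simp
  · rw [if_neg hn, pvRowA]
    have : n.toNat = 0 := by omega
    simp [this]

-- shifting pvRowA n i left gives pvRowA n (i+1), for nonnegative i
theorem pvRowA_shift (n i : Int) (hi : 0 ≤ i) :
    PySem.List.slice (pvRowA n i ++ [0]) (some 1) none = pvRowA n (i + 1) := by
  rw [PySem.List.slice_from_one, ← List.drop_one]
  apply List.ext_getElem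
  · simp [pvRowA]
  · intro k hk hk'
    simp only [pvRowA, List.length_map, List.length_range] at hk'
    rw [List.getElem_drop]
    by_cases hc : 1 + k < n.toNat
    · rw [List.getElem_append_left (by simp [pvRowA]; omega)]
      simp only [pvRowA, List.getElem_map, List.getElem_range]
      have h1 : i + ((1 + k : Nat) : Int) = (i + 1) + (k : Int) := by push_cast; ring
      rw [h1]
    · rw [List.getElem_append_right (by simp [pvRowA]; omega)]
      simp only [pvRowA, List.getElem_map, List.getElem_range, List.length_map,
        List.length_range, List.getElem_singleton]
      rw [if_neg (by omega)]

-- the loop invariant of B's fold: state = (rows so far, current shifted row)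
theorem pvFold_inv (n : Int) (l : List Int) :
    ∀ (acc : List (List Int)) (i : Int), 0 ≤ i →
    l.foldl (fun (st : List (List Int) × List Int) _ =>
        (st.1 ++ [st.2], PySem.List.slice (st.2 ++ [0]) (some 1) none))
      (acc, pvRowA n i)
    = (acc ++ (List.range l.length).map (fun (k : Nat) => pvRowA n (i + (k : Int))), pvRowA n (i + l.length)) := by
  induction l with
  | nil => intro acc i _; simp
  | cons a l ih =>
    intro acc i hi
    simp only [List.foldl_cons, pvRowA_shift n i hi]
    rw [ih (acc ++ [pvRowA n i]) (i + 1) (by omega), Prod.mk.injEq]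
    refine ⟨?_, ?_⟩
    · rw [List.append_assoc]
      congr 1
      rw [List.length_cons, List.range_succ_eq_map]
      simp only [List.map_cons, Nat.cast_zero, add_zero, List.map_map, List.singleton_append]
      apply congrArg
      apply List.map_congr_left
      intro k _
      have h1 : i + 1 + (k : Int) = i + ((k.succ : Nat) : Int) := by push_cast; ring
      simp [Function.comp, h1]
    · congr 1
      simp only [List.length_cons]
      push_cast
      ring

-- ===== VERDICT (by name: the statement is the Claim_ definition above) =====
theorem matriz_zeros_spec : Claim_equal_matriz_zeros := by
  intro m n _
  unfold Spec_matriz_zeros matriz_zeros matriz_zeros_alt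
  by_cases hm : m ≤ 0
  · rw [if_pos hm, PySem.List.pyRange_one_eq_nil hm]
    rfl
  rw [if_neg hm]
  simp only [pvRow0_eq n]
  rw [pvFold_inv n (PySem.List.pyRange 0 m 1) [] 0 le_rfl]
  simp only [List.nil_append, PySem.List.length_pyRange_one, Int.sub_zero]
  rw [PySem.List.foldl_append_singleton_eq_map]
  simp only [List.nil_append]
  have hA : (PySem.List.pyRange 0 m 1).map (fun i =>
      (PySem.List.pyRange 0 n 1).foldl (fun linha j =>
        if i + j == n - 1 then linha ++ [(1 : Int)] else linha ++ [(0 : Int)]) []) =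
      (PySem.List.pyRange 0 m 1).map (fun i => pvRowA n i) := by
    apply List.map_congr_left
    intro i _
    exact pvRowA_eq_inner n i
  rw [hA, PySem.List.pyRange_one, List.map_map, Int.sub_zero]
  apply List.map_congr_left
  intro k _
  simp only [Function.comp]
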